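-- pv_equiv track=rewrite | github.com/MillionConcepts/marslab | marslab/composition.py | insert_after
-- ===== SOURCE A (Python) =====
-- from collections.abc import Callable, Hashable, Mapping, Sequence
-- from typing import Any, Optional
--
-- def insert_after(
--     new_key: Any, new_value: Any, prior_key: Any, mapping: Mapping
-- ) -> Mapping:
--     new_dict = {}
--     for key, value in mapping.items():
--         new_dict[key] = value
--         if key == prior_key:
--             new_dict[new_key] = new_value
--     return new_dict
-- ===== SOURCE B (Python) =====
-- def insert_after(new_key, new_value, prior_key, mapping):
--     items = list(mapping.items())
--     keys = [k for k, _ in items]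
--     if prior_key in keys:
--         items.insert(keys.index(prior_key) + 1, (new_key, new_value))
--     return dict(items)
-- ===== Notes on version B (the rewrite author's own statement) =====
-- stated objective: alternative
-- what changed: B builds the items list once, splices (new_key, new_value) in after the first occurrence of prior_key with list.insert, and lets dict(items) reproduce the overwrite/positioning semantics, instead of A's per-entry rebuild loop with a conditional dict assignment inside; the Lean Pre_ additionally restricts the association-list model to lists with distinct keys, since duplicate-key lists represent no Python dict input.
import Mathlib
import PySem

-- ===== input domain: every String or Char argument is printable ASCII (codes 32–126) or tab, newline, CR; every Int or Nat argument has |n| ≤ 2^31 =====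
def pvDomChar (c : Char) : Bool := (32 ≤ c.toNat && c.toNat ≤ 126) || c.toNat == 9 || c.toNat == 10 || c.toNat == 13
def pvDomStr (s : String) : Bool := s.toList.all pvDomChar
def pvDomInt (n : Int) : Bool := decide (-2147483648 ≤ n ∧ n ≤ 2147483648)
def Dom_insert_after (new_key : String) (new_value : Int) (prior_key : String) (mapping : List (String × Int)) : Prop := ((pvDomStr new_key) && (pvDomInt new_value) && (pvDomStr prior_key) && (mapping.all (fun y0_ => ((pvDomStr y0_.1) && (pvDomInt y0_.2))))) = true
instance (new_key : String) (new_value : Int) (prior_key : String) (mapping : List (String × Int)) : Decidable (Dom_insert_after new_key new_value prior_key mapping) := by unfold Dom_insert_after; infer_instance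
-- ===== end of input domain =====

-- B splices the new pair into the items list once (list.insert after the first occurrence of
-- prior_key) and lets dict(items) do the overwriting, instead of A's per-entry rebuild loop
-- with a conditional assignment inside; objective: alternative (same cost, different decomposition).

-- ===== PORT A =====
def insert_after (new_key : String) (new_value : Int) (prior_key : String) (mapping : List (String × Int)) : List (String × Int) :=
  (mapping.foldl
    (fun new_dict kv =>
      let d1 := new_dict.insert kv.1 kv.2
      if kv.1 == prior_key then d1.insert new_key new_value else d1)
    (PySem.Dict.empty)).items

-- ===== PORT B =====
def insert_after_alt (new_key : String) (new_value : Int) (prior_key : String) (mapping : List (String × Int)) : List (String × Int) :=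
  let items := mapping
  let keys := items.map (fun p => p.1)
  let items2 :=
    if prior_key ∈ keys then
      match PySem.List.index? keys prior_key with
      | some idx => PySem.List.insert items ((idx : Int) + 1) (new_key, new_value)
      | none => items
    else items
  (PySem.Dict.ofList items2).items

-- ===== PRECONDITION & SPEC =====
-- Pre_ restricts the association-list model of the dict argument to lists with pairwise
-- distinct keys: a Python dict always has distinct keys, so a duplicate-key list
-- corresponds to no input the Python function can receive.
def Pre_insert_after (new_key : String) (new_value : Int) (prior_key : String) (mapping : List (String × Int)) : Prop :=
  (mapping.map Prod.fst).Nodup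

instance (new_key : String) (new_value : Int) (prior_key : String) (mapping : List (String × Int)) : Decidable (Pre_insert_after new_key new_value prior_key mapping) := by unfold Pre_insert_after; infer_instance

def pvWitness_insert_after : String × Int × String × (List (String × Int)) :=
  ("b", 7, "a", [("a", 1), ("c", 2)])

def Spec_insert_after (new_key : String) (new_value : Int) (prior_key : String) (mapping : List (String × Int)) (out : List (String × Int)) : Prop := out = insert_after_alt new_key new_value prior_key mapping
instance (new_key : String) (new_value : Int) (prior_key : String) (mapping : List (String × Int)) (out : List (String × Int)) : Decidable (Spec_insert_after new_key new_value prior_key mapping out) := by unfold Spec_insert_after; infer_instance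

-- ===== CLAIM (what is proved, stated in full; the proofs are below) =====
def Claim_equal_insert_after : Prop := ∀ (new_key : String) (new_value : Int) (prior_key : String) (mapping : List (String × Int)), Dom_insert_after new_key new_value prior_key mapping → Pre_insert_after new_key new_value prior_key mapping → Spec_insert_after new_key new_value prior_key mapping (insert_after new_key new_value prior_key mapping)

-- ===== LEMMAS AND PROOFS =====

-- A's loop body (insert the pair, then conditionally insert the new pair) is a fold of plain
-- inserts over the list with [kv, (nk, nv)] substituted for each kv whose key is prior_key.
theorem foldl_if_flatMap {σ α : Type} (g : σ → α → σ) (c : α → Bool) (x : α)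
    (l : List α) (init : σ) :
    l.foldl (fun s a => let s1 := g s a; if c a then g s1 x else s1) init
      = (l.flatMap (fun a => if c a then [a, x] else [a])).foldl g init := by
  induction l generalizing init with
  | nil => rfl
  | cons a t ih =>
    by_cases h : c a = true <;> simp [h, ih]

theorem flatMap_keep {ν : Type} (pk : String) (x : String × ν) (l : List (String × ν))
    (h : ∀ a ∈ l, a.1 ≠ pk) :
    l.flatMap (fun a => if a.1 == pk then [a, x] else [a]) = l := by
  induction l with
  | nil => rfl
  | cons a t ih =>
    rw [List.flatMap_cons, if_neg (by simpa using h a List.mem_cons_self),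
        ih (fun b hb => h b (List.mem_cons_of_mem a hb))]
    rfl

-- The substituted list is exactly B's spliced list, given distinct keys.
theorem splice_eq (nk : String) (nv : Int) (pk : String) (m : List (String × Int))
    (hn : (m.map Prod.fst).Nodup) :
    m.flatMap (fun a => if a.1 == pk then [a, (nk, nv)] else [a]) =
      (if pk ∈ m.map (fun p => p.1) then
        match PySem.List.index? (m.map (fun p => p.1)) pk with
        | some idx => PySem.List.insert m ((idx : Int) + 1) (nk, nv)
        | none => m
      else m) := by
  by_cases hmem : pk ∈ m.map (fun p => p.1)
  · obtain ⟨idx, hidx⟩ := Option.isSome_iff_exists.mp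
      ((PySem.List.index?_isSome_iff _ _).mpr hmem)
    obtain ⟨kpre, ksuf, hks, hlen, hnotpre⟩ :=
      (PySem.List.index?_eq_some_iff _ _ _).mp hidx
    obtain ⟨pre, rest, hm, hpre, hrest⟩ := List.map_eq_append_iff.mp hks
    obtain ⟨b, suf, hb, hb1, hsuf⟩ := List.map_eq_cons_iff.mp hrest
    subst hm hb
    have hks' : List.map Prod.fst (pre ++ b :: suf) = kpre ++ pk :: ksuf := hks
    have hnd := hks' ▸ hn
    have hnotsuf : pk ∉ ksuf := by
      simp only [List.nodup_append, List.nodup_cons] at hnd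
      exact hnd.2.1.1
    have hprelen : pre.length = idx := by
      have := congrArg List.length hpre; simpa [hlen] using this
    have hfl : (pre ++ b :: suf).flatMap
          (fun a => if a.1 == pk then [a, (nk, nv)] else [a])
        = pre ++ (b :: (nk, nv) :: suf) := by
      rw [List.flatMap_append, List.flatMap_cons]
      rw [flatMap_keep pk (nk, nv) pre (by
        intro a hma heq
        exact hnotpre (hpre ▸ heq ▸ List.mem_map_of_mem hma))]
      rw [flatMap_keep pk (nk, nv) suf (by
        intro a hma heq
        exact hnotsuf (hsuf ▸ heq ▸ List.mem_map_of_mem hma))]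
      simp [hb1]
    have hins : PySem.List.insert (pre ++ b :: suf) ((idx : Int) + 1) (nk, nv)
        = pre ++ (b :: (nk, nv) :: suf) := by
      have hle : idx + 1 ≤ (pre ++ b :: suf).length := by
        simp [← hprelen]
      have hspl := PySem.List.insert_natCast (pre ++ b :: suf) (idx + 1) (nk, nv) hle
      rw [show ((idx : Int) + 1) = ((idx + 1 : Nat) : Int) by push_cast; ring, hspl]
      rw [show (pre ++ b :: suf) = (pre ++ [b]) ++ suf by simp]
      rw [List.take_left' (by simp [hprelen]), List.drop_left' (by simp [hprelen])]
      simp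
    simp only [hmem, if_true, hidx, hfl, hins]
  · simp only [hmem, if_false]
    exact flatMap_keep pk (nk, nv) m (by
      intro a hma heq
      exact hmem (heq ▸ List.mem_map_of_mem hma))

-- ===== VERDICT (by name: the statement is the Claim_ definition above) =====
theorem insert_after_spec : Claim_equal_insert_after := by
  intro nk nv pk m _ hpre
  unfold Spec_insert_after insert_after insert_after_alt
  rw [foldl_if_flatMap (fun d (kv : String × Int) => d.insert kv.1 kv.2)
      (fun kv => kv.1 == pk) (nk, nv) m PySem.Dict.empty]
  rw [splice_eq nk nv pk m hpre]
  rfl
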